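-- pv_equiv track=rewrite | github.com/jiyeon2536/algorithm | 프로그래머스/0/181887. 홀수 vs 짝수/홀수 vs 짝수.py | solution
-- ===== SOURCE A (Python) =====
-- def solution(num_list):
--     s1 = 0
--     s2 = 0
--     for i, n in enumerate(num_list):
--         if i % 2:
--             s1 += n
--         else:
--             s2 += n
--     return max(s1, s2)
-- ===== SOURCE B (Python) =====
-- def solution(num_list):
--     return max(sum(num_list[::2]), sum(num_list[1::2]))
-- ===== Notes on version B (the rewrite author's own statement) =====
-- stated objective: idiomatic
-- what changed: Replaced the single enumerate loop with an index-parity branch by two strided slices (num_list[::2] and num_list[1::2]) summed directly; no index bookkeeping at all.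
import Mathlib
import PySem

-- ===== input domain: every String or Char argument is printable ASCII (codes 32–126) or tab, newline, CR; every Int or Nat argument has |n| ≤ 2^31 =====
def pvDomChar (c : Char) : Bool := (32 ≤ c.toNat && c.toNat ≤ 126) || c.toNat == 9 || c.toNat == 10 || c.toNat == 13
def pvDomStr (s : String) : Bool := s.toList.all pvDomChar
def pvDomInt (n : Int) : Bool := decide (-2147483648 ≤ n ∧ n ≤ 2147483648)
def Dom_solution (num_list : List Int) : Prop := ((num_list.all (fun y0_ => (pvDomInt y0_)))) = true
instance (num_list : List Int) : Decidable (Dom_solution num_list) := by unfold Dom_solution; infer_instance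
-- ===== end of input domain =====

-- B replaces A's single enumerate loop with an index-parity branch by two strided
-- slices summed directly (idiomatic; same cost).

-- ===== PORT A =====
-- the 'for i, n in enumerate(num_list)' loop, carrying (i, s1, s2)
def solutionLoop (i : Nat) (xs : List Int) (s1 s2 : Int) : Int × Int :=
  match xs with
  | [] => (s1, s2)
  | n :: t => if i % 2 = 1 then solutionLoop (i + 1) t (s1 + n) s2
              else solutionLoop (i + 1) t s1 (s2 + n)

def solution (num_list : List Int) : Int :=
  let p := solutionLoop 0 num_list 0 0
  max p.1 p.2

-- ===== PORT B =====
-- hand port of the stride-2 slice xs[::2] (PySem.List.slice has no step); exact on all lists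
def stride2 : List Int → List Int
  | [] => []
  | [a] => [a]
  | a :: _ :: t => a :: stride2 t

-- Source B: max(sum(num_list[::2]), sum(num_list[1::2]));  num_list[1::2] = stride2 (num_list.drop 1)
def solution_alt (num_list : List Int) : Int :=
  max (stride2 num_list).sum (stride2 (num_list.drop 1)).sum

-- ===== PRECONDITION & SPEC =====
def Spec_solution (num_list : List Int) (out : Int) : Prop := out = solution_alt num_list
instance (num_list : List Int) (out : Int) : Decidable (Spec_solution num_list out) := by unfold Spec_solution; infer_instance

-- ===== CLAIM (what is proved, stated in full; the proofs are below) =====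
def Claim_equal_solution : Prop := ∀ (num_list : List Int), Dom_solution num_list → Spec_solution num_list (solution num_list)

-- ===== LEMMAS AND PROOFS =====
theorem stride2_cons (a : Int) (t : List Int) : stride2 (a :: t) = a :: stride2 t.tail := by
  cases t <;> rfl

theorem solutionLoop_eq (xs : List Int) : ∀ (i : Nat) (s1 s2 : Int),
    solutionLoop i xs s1 s2 =
      if i % 2 = 1 then (s1 + (stride2 xs).sum, s2 + (stride2 xs.tail).sum)
      else (s1 + (stride2 xs.tail).sum, s2 + (stride2 xs).sum) := by
  induction xs with
  | nil => intro i s1 s2; simp [solutionLoop, stride2]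
  | cons a t ih =>
    intro i s1 s2
    simp only [solutionLoop, stride2_cons, List.tail_cons]
    rcases Nat.mod_two_eq_zero_or_one i with h | h
    · have h1 : (i + 1) % 2 = 1 := by omega
      simp [h, h1, ih, List.sum_cons]; ring
    · have h1 : ¬ (i + 1) % 2 = 1 := by omega
      simp [h, h1, ih, List.sum_cons]; ring

-- ===== VERDICT (by name: the statement is the Claim_ definition above) =====
theorem solution_spec : Claim_equal_solution := by
  intro xs _
  unfold Spec_solution solution solution_alt
  simp [solutionLoop_eq, List.drop_one, max_comm]
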